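-- pv_equiv track=rewrite | github.com/RileyABober/NL2PrefSTL | prompt_gen.py | find_STL
-- ===== SOURCE A (Python) =====
-- def find_STL(prompt):
--     '''find text surrounded by {} brackets'''
--     begin = None
--     end = None
--     #first find the end of think (relevant string deepseek which starts the actual response message)
--     start = prompt.find("</think>")
--     if start == -1:
--         start = 0
--     for index in range(len(prompt) - start):
--         c = index + start
--         if prompt[c] == '{' and begin is None:
--             begin = c
--         if begin != None and prompt[c] == '}':
--             end = c + 1
--
--     if begin is None:
--         error = "A final answer must contain brackets { }around the final stl answer"
--         return (False, error)
--     if end is None: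
--         error = "The beginning bracket { of the stl is found but not the end bracket }"
--         return (False, error)
--
--     return (True, prompt[begin:end])
-- ===== SOURCE B (Python) =====
-- def find_STL(prompt):
--     '''find text surrounded by {} brackets'''
--     _head, sep, tail = prompt.partition("</think>")
--     t = sep + tail if sep else prompt
--     _pre, brace, rest = t.partition('{')
--     if not brace:
--         return (False, "A final answer must contain brackets { }around the final stl answer")
--     body, brace2, _post = rest.rpartition('}')
--     if not brace2:
--         return (False, "The beginning bracket { of the stl is found but not the end bracket }")
--     return (True, '{' + body + '}')
-- ===== Notes on version B (the rewrite author's own statement) =====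
-- stated objective: simpler
-- what changed: A's single stateful character-by-character loop tracking begin/end indices is replaced by three string partitions (partition on the '</think>' marker, partition on '{', rpartition on '}') that work on substrings with no indices, no slicing and no explicit loop, rebuilding the answer by concatenation.
import Mathlib
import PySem

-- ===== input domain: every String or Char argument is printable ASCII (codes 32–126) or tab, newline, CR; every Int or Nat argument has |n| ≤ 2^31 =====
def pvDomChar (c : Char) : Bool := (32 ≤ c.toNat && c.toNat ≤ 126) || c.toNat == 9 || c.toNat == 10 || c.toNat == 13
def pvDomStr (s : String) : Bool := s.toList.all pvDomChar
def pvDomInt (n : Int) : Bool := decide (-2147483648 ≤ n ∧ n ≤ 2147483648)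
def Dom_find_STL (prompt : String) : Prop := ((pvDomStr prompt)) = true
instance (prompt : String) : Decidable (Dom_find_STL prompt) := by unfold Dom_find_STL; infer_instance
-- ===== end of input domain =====

-- B replaces A's stateful index-tracking character loop by three string partitions (partition on the marker, partition on '{', rpartition on '}') and rebuilds the answer by concatenation — no indices, no slicing, no loop (simpler decomposition).

-- ===== PORT A =====
-- literal transliteration of A: stateful forward loop over all indices from `start`
def find_STL (prompt : String) : Bool × String :=
  let start0 := PySem.Str.find prompt "</think>"
  let start : Int := if start0 = -1 then 0 else start0
  let st := (PySem.List.pyRange 0 ((PySem.Str.len prompt) - start) 1).foldl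
      (fun (st : Option Int × Option Int) index =>
        let c := index + start
        -- prompt[c]: c is always a valid index here, so the default is unreachable
        let ch := PySem.List.pyGetD prompt.toList c ' '
        let b := if ch = '{' ∧ st.1 = none then some c else st.1
        let e := if b ≠ none ∧ ch = '}' then some (c + 1) else st.2
        (b, e))
      ((none, none) : Option Int × Option Int)
  match st with
  | (none, _) => (false, "A final answer must contain brackets { }around the final stl answer")
  | (some _, none) => (false, "The beginning bracket { of the stl is found but not the end bracket }")
  | (some b, some e) => (true, PySem.Str.slice prompt (some b) (some e))

-- ===== PORT B =====
-- s.partition(sep) for a NONEMPTY sep: (before, sep, after) at the FIRST occurrence, (s, '', '') if absent — exact CPython behaviour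
def pyPartition (s sep : String) : String × String × String :=
  let i := PySem.Str.find s sep
  if i = -1 then (s, "", "")
  else (PySem.Str.slice s none (some i), sep,
        PySem.Str.slice s (some (i + PySem.Str.len sep)) none)

-- s.rpartition(sep) for a NONEMPTY sep: (before, sep, after) at the LAST occurrence, ('', '', s) if absent — exact CPython behaviour
def pyRpartition (s sep : String) : String × String × String :=
  let i := PySem.Str.rfind s sep
  if i = -1 then ("", "", s)
  else (PySem.Str.slice s none (some i), sep,
        PySem.Str.slice s (some (i + PySem.Str.len sep)) none)

-- transliteration of B: partition on the marker, partition on '{', rpartition on '}', concatenate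
def find_STL_alt (prompt : String) : Bool × String :=
  let p1 := pyPartition prompt "</think>"
  let t := if p1.2.1 ≠ "" then p1.2.1 ++ p1.2.2 else prompt
  let p2 := pyPartition t "{"
  if p2.2.1 = "" then
    (false, "A final answer must contain brackets { }around the final stl answer")
  else
    let p3 := pyRpartition p2.2.2 "}"
    if p3.2.1 = "" then
      (false, "The beginning bracket { of the stl is found but not the end bracket }")
    else
      (true, "{" ++ p3.1 ++ "}")

-- ===== PRECONDITION & SPEC =====
def Spec_find_STL (prompt : String) (out : Bool × String) : Prop := out = find_STL_alt prompt
instance (prompt : String) (out : Bool × String) : Decidable (Spec_find_STL prompt out) := by unfold Spec_find_STL; infer_instance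

-- ===== CLAIM (what is proved, stated in full; the proofs are below) =====
def Claim_equal_find_STL : Prop := ∀ (prompt : String), Dom_find_STL prompt → Spec_find_STL prompt (find_STL prompt)

-- ===== LEMMAS AND PROOFS =====

-- index of the first occurrence of `a` in the list
def firstIdx (a : Char) : List Char → Option Nat
  | [] => none
  | c :: t => if c = a then some 0 else (firstIdx a t).map (· + 1)

-- index of the last occurrence of `a` in the list
def lastIdx (a : Char) : List Char → Option Nat
  | [] => none
  | c :: t =>
    match lastIdx a t with
    | some j => some (j + 1)
    | none => if c = a then some 0 else none

-- A's loop, restructured as structural recursion over the suffix with absolute position i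
def foldE (step : Option Int × Option Int → Int → Char → Option Int × Option Int) :
    List Char → Int → Option Int × Option Int → Option Int × Option Int
  | [], _, st => st
  | c :: t, i, st => foldE step t (i + 1) (step st i c)

def stepA (st : Option Int × Option Int) (c : Int) (ch : Char) : Option Int × Option Int :=
  let b := if ch = '{' ∧ st.1 = none then some c else st.1
  let e := if b ≠ none ∧ ch = '}' then some (c + 1) else st.2
  (b, e)

theorem str_toList_inj (s t : String) (h : s.toList = t.toList) : s = t :=
  String.toList_inj.mp h

theorem firstIdx_some_lt {a : Char} {t : List Char} {d : Nat}
    (h : firstIdx a t = some d) : d < t.length := by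
  induction t generalizing d with
  | nil => simp [firstIdx] at h
  | cons c t ih =>
    simp only [firstIdx] at h
    split at h
    · injection h with h; simp; omega
    · rw [Option.map_eq_some_iff] at h
      obtain ⟨j, hj, rfl⟩ := h
      have := ih hj
      simp; omega

theorem firstIdx_getElem {a : Char} {t : List Char} {d : Nat}
    (h : firstIdx a t = some d) : t[d]? = some a := by
  induction t generalizing d with
  | nil => simp [firstIdx] at h
  | cons c t ih =>
    simp only [firstIdx] at h
    split at h
    · injection h with h; subst h
      simp_all
    · rw [Option.map_eq_some_iff] at h
      obtain ⟨j, hj, rfl⟩ := h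
      simpa using ih hj

theorem lastIdx_some_lt {a : Char} {t : List Char} {j : Nat}
    (h : lastIdx a t = some j) : j < t.length := by
  induction t generalizing j with
  | nil => simp [lastIdx] at h
  | cons c t ih =>
    simp only [lastIdx] at h
    cases hft : lastIdx a t with
    | none =>
      rw [hft] at h
      by_cases hc : c = a
      · simp [hc] at h
        simp; omega
      · simp [hc] at h
    | some m =>
      rw [hft] at h
      injection h with h
      have := ih hft
      simp; omega

theorem lastIdx_getElem {a : Char} {t : List Char} {j : Nat}
    (h : lastIdx a t = some j) : t[j]? = some a := by
  induction t generalizing j with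
  | nil => simp [lastIdx] at h
  | cons c t ih =>
    simp only [lastIdx] at h
    cases hft : lastIdx a t with
    | none =>
      rw [hft] at h
      by_cases hc : c = a
      · simp [hc] at h; subst h; simp_all
      · simp [hc] at h
    | some m =>
      rw [hft] at h
      injection h with h
      subst h
      simpa using ih hft

theorem lastIdx_append_singleton (a c : Char) (xs : List Char) :
    lastIdx a (xs ++ [c]) = if c = a then some xs.length else lastIdx a xs := by
  induction xs with
  | nil => by_cases hc : c = a <;> simp [lastIdx, hc]
  | cons x xs ih =>
    simp only [List.cons_append, lastIdx, ih]
    by_cases hc : c = a <;> simp only [hc, if_true, if_false] <;>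
      first
        | rfl
        | (cases lastIdx a xs <;> rfl)

-- the slice up to and including the last occurrence is the slice before it plus the character
theorem take_lastIdx_succ {a : Char} {t : List Char} {j : Nat}
    (h : lastIdx a t = some j) : t.take (j + 1) = t.take j ++ [a] := by
  have hlt := lastIdx_some_lt h
  have hget := lastIdx_getElem h
  rw [List.take_succ, hget]
  rfl

-- Chars.find on a single-character needle is firstIdx
theorem find_go_singleton (a : Char) (s : List Char) (k : Nat) :
    PySem.Chars.find.go [a] s k =
      match firstIdx a s with
      | none => -1
      | some i => ((k + i : Nat) : Int) := by
  induction s generalizing k with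
  | nil => simp [PySem.Chars.find.go, firstIdx]
  | cons c t ih =>
    rw [PySem.Chars.find.go]
    by_cases hc : c = a
    · subst hc
      simp [List.isPrefixOf, firstIdx]
    · have hpre : [a].isPrefixOf (c :: t) = false := by
        simp [List.isPrefixOf]; exact fun h => absurd h.symm hc
      simp only [hpre, if_false, ih, firstIdx, hc, if_false]
      cases firstIdx a t with
      | none => rfl
      | some i => simp [Option.map_some]; ring

theorem find_singleton (a : Char) (s : List Char) :
    PySem.Chars.find s [a] =
      match firstIdx a s with
      | none => -1
      | some i => (i : Int) := by
  have := find_go_singleton a s 0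
  simpa [PySem.Chars.find] using this

-- Chars.rfind on a single-character needle is lastIdx
theorem rfind_go_singleton (a : Char) (s : List Char) (m : Nat) :
    PySem.Chars.rfind.go s [a] m =
      match lastIdx a (s.take (m + 1)) with
      | none => -1
      | some j => (j : Int) := by
  induction m with
  | zero =>
    rw [PySem.Chars.rfind.go]
    cases s with
    | nil => simp [lastIdx, List.isPrefixOf]
    | cons c t =>
      by_cases hc : c = a
      · subst hc; simp [List.isPrefixOf, lastIdx]
      · have hpre : [a].isPrefixOf (c :: t) = false := by
          simp [List.isPrefixOf]; exact fun h => absurd h.symm hc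
        simp [hpre, lastIdx, hc]
  | succ m ih =>
    rw [PySem.Chars.rfind.go]
    have htake : s.take (m + 1 + 1) = s.take (m + 1) ++ (s[m+1]?).toList := by
      exact List.take_succ
    by_cases hin : m + 1 < s.length
    · have hget : s[m+1]? = some s[m+1] := List.getElem?_eq_getElem hin
      have hdrop : List.drop (m + 1) s = s[m+1] :: List.drop (m + 2) s := by
        exact List.drop_eq_getElem_cons hin
      by_cases hc : s[m+1] = a
      · have hpre : [a].isPrefixOf (List.drop (m + 1) s) = true := by
          rw [hdrop, hc]; simp [List.isPrefixOf]
        rw [htake, hget]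
        simp only [hpre, if_true, Option.toList_some]
        rw [lastIdx_append_singleton]
        have hlen : (s.take (m + 1)).length = m + 1 := by
          simp; omega
        simp [hc, hlen]
      · have hpre : [a].isPrefixOf (List.drop (m + 1) s) = false := by
          rw [hdrop]; simp [List.isPrefixOf]; exact fun h => absurd h.symm hc
        rw [htake, hget]
        simp only [hpre, if_false, Option.toList_some]
        rw [lastIdx_append_singleton]
        simp [hc, ih]
    · have hget : s[m+1]? = none := by
        exact List.getElem?_eq_none (by omega)
      have hdrop : List.drop (m + 1) s = [] := by
        apply List.drop_eq_nil_of_le; omega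
      have hpre : [a].isPrefixOf (List.drop (m + 1) s) = false := by
        rw [hdrop]; rfl
      rw [htake, hget]
      simp only [hpre, Bool.false_eq_true, if_false, Option.toList_none, List.append_nil, ih]

theorem rfind_singleton (a : Char) (s : List Char) :
    PySem.Chars.rfind s [a] =
      match lastIdx a s with
      | none => -1
      | some j => (j : Int) := by
  unfold PySem.Chars.rfind
  cases hs : s with
  | nil => simp [PySem.Chars.rfind.go, lastIdx, List.isPrefixOf]
  | cons c t =>
    have hlen : (c :: t).length = t.length + 1 := rfl
    rw [hlen, rfind_go_singleton]
    have h2 : List.take (t.length + 1 + 1) (c :: t) = c :: t := by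
      apply List.take_of_length_le; simp
    rw [h2]

-- A's range-fold equals foldE over the dropped suffix
theorem fold_range_eq_foldE (step : Option Int × Option Int → Int → Char → Option Int × Option Int)
    (cs : List Char) :
    ∀ (t : List Char) (k : Nat) (st : Option Int × Option Int),
      cs.drop k = t →
      (List.range t.length).foldl
        (fun st (j : Nat) => step st ((k : Int) + j) (PySem.List.pyGetD cs ((k : Int) + j) ' ')) st
      = foldE step t (k : Int) st := by
  intro t
  induction t with
  | nil => intro k st _; simp [foldE]
  | cons c t ih =>
    intro k st hdrop
    have hk : k < cs.length := by
      by_contra h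
      have : cs.drop k = [] := List.drop_eq_nil_of_le (by omega)
      rw [this] at hdrop; exact absurd hdrop (by simp)
    have hget : cs[k]? = some c := by
      have h0 : (cs.drop k)[0]? = some c := by rw [hdrop]; rfl
      rw [List.getElem?_drop] at h0
      simpa using h0
    have hdrop' : cs.drop (k + 1) = t := by
      have := List.drop_eq_getElem_cons hk
      rw [hdrop] at this
      have := congrArg (·.tail) this
      simpa using this.symm
    have hlen : (c :: t).length = t.length + 1 := rfl
    rw [hlen, List.range_succ_eq_map]
    simp only [List.foldl_cons, List.foldl_map]
    have hgd : PySem.List.pyGetD cs ((k : Int) + (0 : Nat)) ' ' = c := by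
      have : ((k : Int) + (0 : Nat)) = ((k : Nat) : Int) := by push_cast; ring
      rw [this, PySem.List.pyGetD_natCast]
      simp [List.getD, hget]
    rw [foldE]
    have hstep : step st ((k : Int) + (0 : Nat)) (PySem.List.pyGetD cs ((k : Int) + (0 : Nat)) ' ')
        = step st (k : Int) c := by
      rw [hgd]; norm_num
    rw [hstep]
    have hfun : (fun (x : Option Int × Option Int) (y : Nat) =>
          step x ((k : Int) + (y.succ : Nat)) (PySem.List.pyGetD cs ((k : Int) + (y.succ : Nat)) ' '))
        = (fun (x : Option Int × Option Int) (y : Nat) =>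
          step x (((k + 1 : Nat) : Int) + (y : Nat)) (PySem.List.pyGetD cs (((k + 1 : Nat) : Int) + (y : Nat)) ' ')) := by
      funext x y
      rw [show ((k : Int) + (y.succ : Nat)) = (((k + 1 : Nat) : Int) + (y : Nat)) by push_cast; ring]
    rw [hfun, ih (k + 1) (step st (k : Int) c) hdrop',
      show (((k + 1 : Nat)) : Int) = (k : Int) + 1 by push_cast; ring]

-- foldE with begin already set only updates end: it becomes the last '}' of the suffix
theorem foldE_some (t : List Char) :
    ∀ (i b : Int) (e : Option Int),
      foldE stepA t i (some b, e) =
        (some b,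
          match lastIdx '}' t with
          | none => e
          | some j => some (i + j + 1)) := by
  induction t with
  | nil => intro i b e; simp [foldE, lastIdx]
  | cons c t ih =>
    intro i b e
    rw [foldE]
    have hstep : stepA (some b, e) i c
        = (some b, if c = '}' then some (i + 1) else e) := by
      simp [stepA]
    rw [hstep, ih]
    simp only [lastIdx]
    cases lastIdx '}' t with
    | none =>
      by_cases hc : c = '}' <;> simp [hc]
    | some j =>
      simp only []
      congr 1
      push_cast; ring

-- foldE from the empty state: begin is the first '{', end the last '}' after it
theorem foldE_none (t : List Char) :
    ∀ (i : Int),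
      foldE stepA t i (none, none) =
        match firstIdx '{' t with
        | none => (none, none)
        | some d =>
          (some (i + d),
            match lastIdx '}' (t.drop d) with
            | none => none
            | some j => some (i + d + j + 1)) := by
  induction t with
  | nil => intro i; simp [foldE, firstIdx]
  | cons c t ih =>
    intro i
    rw [foldE]
    by_cases hc : c = '{'
    · subst hc
      have hne : ('{' : Char) ≠ '}' := by decide
      have hstep : stepA (none, none) i '{' = (some i, none) := by
        simp [stepA, hne]
      rw [hstep, foldE_some]
      have hfi : firstIdx '{' ('{' :: t) = some 0 := by simp [firstIdx]
      rw [hfi]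
      cases hlt : lastIdx '}' t with
      | none =>
        have h2 : lastIdx '}' ('{' :: t) = none := by simp [lastIdx, hlt, hne]
        simp [h2]
      | some j =>
        have h2 : lastIdx '}' ('{' :: t) = some (j + 1) := by simp [lastIdx, hlt]
        simp only [h2, List.drop_zero, Prod.mk.injEq]
        refine ⟨by norm_num, ?_⟩
        congr 1
        push_cast; ring
    · have hstep : stepA (none, none) i c = (none, none) := by
        simp [stepA, hc]
      rw [hstep, ih]
      simp only [firstIdx, hc, if_false]
      cases hft : firstIdx '{' t with
      | none => rfl
      | some d =>
        simp only [Option.map_some, List.drop_succ_cons]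
        congr 1
        · congr 1; push_cast; ring
        · cases lastIdx '}' (t.drop d) with
          | none => rfl
          | some j => simp only []; congr 1; push_cast; ring

-- B's intermediate string t (the marker-partition step) has the same characters as prompt from A's `start` on
theorem alt_t_toList (prompt : String) :
    (if (pyPartition prompt "</think>").2.1 ≠ "" then
        (pyPartition prompt "</think>").2.1 ++ (pyPartition prompt "</think>").2.2
      else prompt).toList
    = prompt.toList.drop (if PySem.Chars.find prompt.toList "</think>".toList = -1 then 0
        else (PySem.Chars.find prompt.toList "</think>".toList).toNat) := by
  by_cases h : PySem.Chars.find prompt.toList "</think>".toList = -1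
  · have hp : pyPartition prompt "</think>" = (prompt, "", "") := by
      unfold pyPartition
      rw [PySem.Str.find_eq, if_pos h]
    rw [hp, if_pos h]
    simp
  · have hge : 0 ≤ PySem.Chars.find prompt.toList "</think>".toList := by
      have := PySem.Chars.neg_one_le_find prompt.toList "</think>".toList
      omega
    set i := PySem.Chars.find prompt.toList "</think>".toList with hi
    have h8 : ("</think>".toList.length : Int) = 8 := by decide
    have hp : pyPartition prompt "</think>" =
        (PySem.Str.slice prompt none (some i), "</think>",
          PySem.Str.slice prompt (some (i + ("</think>".toList.length : Nat))) none) := by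
      unfold pyPartition
      rw [PySem.Str.find_eq, PySem.Str.len_eq, ← hi, if_neg h]
    have hspec := (PySem.Chars.find_spec (s := prompt.toList) (sub := "</think>".toList) hge).1
    obtain ⟨u, hu⟩ := hspec
    rw [hp, if_neg h]
    simp only []
    rw [if_pos (show ("</think>" : String) ≠ "" by decide)]
    rw [String.toList_append]
    rw [PySem.Str.toList_slice, PySem.Chars.slice_eq_listSlice,
      PySem.List.slice_from prompt.toList (by omega)]
    have hu' : u = prompt.toList.drop (i + ("</think>".toList.length : Nat)).toNat := by
      have := congrArg (List.drop 8) hu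
      rw [List.drop_append_of_le_length (by decide)] at this
      have h8' : List.drop 8 "</think>".toList = [] := by decide
      rw [h8', List.nil_append, List.drop_drop] at this
      rw [this]; congr 1
      omega
    rw [← hu', hu, ← hi]

set_option maxHeartbeats 1000000 in
theorem find_STL_eq_alt (prompt : String) : find_STL prompt = find_STL_alt prompt := by
  have ht := alt_t_toList prompt
  unfold find_STL find_STL_alt
  simp only [PySem.Str.find_eq, PySem.Str.len_eq]
  set cs := prompt.toList with hcs
  set s0 := PySem.Chars.find cs "</think>".toList with hs0
  set start : Int := if s0 = -1 then 0 else s0 with hstart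
  have hge : 0 ≤ start := by
    rw [hstart]; split
    · omega
    · have := PySem.Chars.neg_one_le_find cs "</think>".toList
      rw [← hs0] at this; omega
  have hle : start ≤ (cs.length : Int) := by
    rw [hstart]; split
    · omega
    · have := PySem.Chars.find_le_length cs "</think>".toList
      rw [← hs0] at this; omega
  set k := start.toNat with hk
  have hks : (k : Int) = start := Int.toNat_of_nonneg hge
  have hkn : k ≤ cs.length := by omega
  -- the intermediate string t of B
  set t : String := (if (pyPartition prompt "</think>").2.1 ≠ "" then
        (pyPartition prompt "</think>").2.1 ++ (pyPartition prompt "</think>").2.2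
      else prompt) with htdef
  have htk : t.toList = cs.drop k := by
    rw [htdef, ht]
    congr 1
    rw [hk, hstart, hs0, hcs]
    split <;> simp_all
  -- A's fold = foldE over the suffix
  have hlen : ((cs.length : Int) - start - 0).toNat = (cs.drop k).length := by
    rw [List.length_drop]; omega
  have hfoldA :
      (PySem.List.pyRange 0 ((cs.length : Int) - start)).foldl
        (fun (st : Option Int × Option Int) index =>
          (if PySem.List.pyGetD cs (index + start) ' ' = '{' ∧ st.1 = none then some (index + start) else st.1,
            if (if PySem.List.pyGetD cs (index + start) ' ' = '{' ∧ st.1 = none then some (index + start)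
                else st.1) ≠ none ∧ PySem.List.pyGetD cs (index + start) ' ' = '}' then
              some (index + start + 1)
            else st.2)) (none, none)
      = foldE stepA (cs.drop k) (k : Int) (none, none) := by
    change (PySem.List.pyRange 0 ((cs.length : Int) - start)).foldl
        (fun (st : Option Int × Option Int) index =>
          stepA st (index + start) (PySem.List.pyGetD cs (index + start) ' ')) (none, none) = _
    rw [PySem.List.pyRange_one, List.foldl_map]
    have hfun : (fun (x : Option Int × Option Int) (y : Nat) =>
          stepA x (((0 : Int) + y) + start) (PySem.List.pyGetD cs (((0 : Int) + y) + start) ' '))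
        = (fun (x : Option Int × Option Int) (y : Nat) =>
          stepA x ((k : Int) + y) (PySem.List.pyGetD cs ((k : Int) + y) ' ')) := by
      funext x y
      rw [show ((0 : Int) + y) + start = (k : Int) + y by omega]
    rw [hlen, hfun, fold_range_eq_foldE stepA cs (cs.drop k) k (none, none) rfl]
  rw [hfoldA]
  -- B: partition t on '{'
  have hfind2 : PySem.Str.find t "{" =
      match firstIdx '{' (cs.drop k) with
      | none => -1
      | some d => (d : Int) := by
    rw [PySem.Str.find_eq, htk, show ("{" : String).toList = ['{'] from rfl, find_singleton]
  cases hfi : firstIdx '{' (cs.drop k) with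
  | none =>
    -- no '{': both return the first error
    have hp2 : pyPartition t "{" = (t, "", "") := by
      unfold pyPartition
      rw [hfind2, hfi, if_pos rfl]
    have hfold0 : foldE stepA (cs.drop k) ((k : Nat) : Int) (none, none) = (none, none) := by
      simp only [foldE_none, hfi]
    rw [hfold0, hp2]
    simp only []
    rw [if_pos trivial]
  | some d =>
    have hd : k + d < cs.length := by
      have := firstIdx_some_lt hfi
      rw [List.length_drop] at this
      omega
    have hcsd : cs[k + d]? = some '{' := by
      have := firstIdx_getElem hfi
      rw [List.getElem?_drop] at this
      exact this
    have hdropkd : cs.drop (k + d) = '{' :: cs.drop (k + d + 1) := by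
      have h1 := List.drop_eq_getElem_cons (l := cs) (i := k + d) hd
      have h2 : cs[k + d] = '{' := by
        have := List.getElem?_eq_getElem (l := cs) (i := k + d) hd
        rw [hcsd] at this
        exact (Option.some_inj.mp this).symm
      rw [h1, h2]
    have hp2 : pyPartition t "{" =
        (PySem.Str.slice t none (some (d : Int)), "{",
          PySem.Str.slice t (some ((d : Int) + 1)) none) := by
      unfold pyPartition
      rw [hfind2, hfi, PySem.Str.len_eq, if_neg (show ¬ ((d : Int) = -1) by omega)]
      norm_num [show ("{" : String).length = 1 by decide]
    -- rest = everything after the first '{'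
    set rest := PySem.Str.slice t (some ((d : Int) + 1)) none with hrest
    have hc1 : (pyPartition t "{").2.1 = "{" := by rw [hp2]
    have hc2 : (pyPartition t "{").2.2 = rest := by rw [hp2, hrest]
    have hbne : ¬ (("{" : String) = "") := by decide
    rw [hc1, hc2, if_neg hbne]
    have hrl : rest.toList = cs.drop (k + d + 1) := by
      rw [hrest, PySem.Str.toList_slice, PySem.Chars.slice_eq_listSlice, htk,
        show ((d : Int) + 1) = ((d + 1 : Nat) : Int) by push_cast; ring,
        PySem.List.slice_from_natCast (cs.drop k), List.drop_drop]
      try (congr 1 <;> omega)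
    have hrf3 : PySem.Str.rfind rest "}" =
        match lastIdx '}' (cs.drop (k + d + 1)) with
        | none => -1
        | some j => (j : Int) := by
      rw [PySem.Str.rfind_eq, hrl, show ("}" : String).toList = ['}'] from rfl, rfind_singleton]
    have hlast : lastIdx '}' (cs.drop (k + d)) =
        match lastIdx '}' (cs.drop (k + d + 1)) with
        | none => none
        | some j' => some (j' + 1) := by
      rw [hdropkd]
      simp only [lastIdx]
      cases lastIdx '}' (cs.drop (k + d + 1)) with
      | none => simp [show ('{' : Char) ≠ '}' from by decide]
      | some j' => rfl
    cases hlj : lastIdx '}' (cs.drop (k + d + 1)) with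
    | none =>
      -- '{' found but no '}' after it: both return the second error
      have hp3 : pyRpartition rest "}" = ("", "", rest) := by
        unfold pyRpartition
        rw [hrf3, hlj, if_pos rfl]
      have hd1 : (pyRpartition rest "}").2.1 = "" := by rw [hp3]
      have hfold : foldE stepA (cs.drop k) ((k : Nat) : Int) (none, none)
          = (some ((k : Int) + (d : Int)), none) := by
        simp only [foldE_none, hfi]
        rw [List.drop_drop, hlast, hlj]
      rw [hfold, hd1, if_pos rfl]
    | some j' =>
      have hp3 : pyRpartition rest "}" =
          (PySem.Str.slice rest none (some (j' : Int)), "}",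
            PySem.Str.slice rest (some ((j' : Int) + 1)) none) := by
        unfold pyRpartition
        rw [hrf3, hlj, PySem.Str.len_eq, if_neg (show ¬ ((j' : Int) = -1) by omega)]
        norm_num [show ("}" : String).length = 1 by decide]
      have hd1 : (pyRpartition rest "}").2.1 = "}" := by rw [hp3]
      have hd0 : (pyRpartition rest "}").1 = PySem.Str.slice rest none (some (j' : Int)) := by rw [hp3]
      have hbne2 : ¬ (("}" : String) = "") := by decide
      have hfold : foldE stepA (cs.drop k) ((k : Nat) : Int) (none, none)
          = (some ((k : Int) + (d : Int)), some ((k : Int) + (d : Int) + ((j' + 1 : Nat) : Int) + 1)) := by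
        simp only [foldE_none, hfi]
        rw [List.drop_drop, hlast, hlj]
      rw [hfold, hd1, hd0, if_neg hbne2]
      show (true, PySem.Str.slice prompt (some ((k : Int) + (d : Int)))
          (some ((k : Int) + (d : Int) + ((j' + 1 : Nat) : Int) + 1)))
        = (true, "{" ++ PySem.Str.slice rest none (some (j' : Int)) ++ "}")
      refine Prod.ext rfl ?_
      apply str_toList_inj
      -- A's slice
      have hA : (PySem.Str.slice prompt (some ((k : Int) + (d : Int)))
            (some ((k : Int) + (d : Int) + ((j' + 1 : Nat) : Int) + 1))).toList
          = '{' :: ((cs.drop (k + d + 1)).take j' ++ ['}']) := by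
        rw [PySem.Str.toList_slice, PySem.Chars.slice_eq_listSlice, ← hcs,
          show ((k : Int) + (d : Int)) = ((k + d : Nat) : Int) by push_cast; ring,
          show (((k + d : Nat) : Int) + ((j' + 1 : Nat) : Int) + 1) = ((k + d + (j' + 2) : Nat) : Int) by push_cast; ring,
          PySem.List.slice_natCast cs]
        rw [show k + d + (j' + 2) - (k + d) = j' + 2 from by omega, hdropkd]
        rw [show j' + 2 = (j' + 1) + 1 from rfl, List.take_succ_cons,
          take_lastIdx_succ hlj]
      simp only [String.toList_append]
      rw [hA, PySem.Str.toList_slice, PySem.Chars.slice_eq_listSlice, hrl, PySem.List.slice_to_natCast (cs.drop (k + d + 1))]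
      rfl

-- ===== VERDICT (by name: the statement is the Claim_ definition above) =====
theorem find_STL_spec : Claim_equal_find_STL := by
  intro prompt _
  unfold Spec_find_STL
  exact find_STL_eq_alt prompt
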